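-- pv_equiv track=rewrite | github.com/domeng/PScodes | Practice/srm_505_easy_RectangleArea.py | minimumQueries
-- ===== SOURCE A (Python) =====
-- from itertools import product
--
-- def minimumQueries(known):
--   n = len(known)
--   m = len(known[0])
--
--   rs = list(range(n))
--   cs = list(range(n,n+m))
--
--   for i,j in product(range(n),range(m)):
--     if known[i][j] == 'Y':
--       a,b = rs[i],cs[j]
--       for x in range(n):
--         if rs[x] == a:
--           rs[x] = b
--       for x in range(m):
--         if cs[x] == a:
--           cs[x] = b
--   return len(set(rs+cs))-1
-- ===== SOURCE B (Python) =====
-- def minimumQueries(known):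
--     n = len(known)
--     m = len(known[0])
--     N = n + m
--     parent = list(range(N))
--
--     def find(x):
--         while parent[x] != x:
--             x = parent[x]
--         return x
--
--     for i in range(n):
--         row = known[i]
--         for j in range(m):
--             if row[j] == 'Y':
--                 ra = find(i)
--                 rb = find(n + j)
--                 if ra != rb:
--                     parent[ra] = rb
--     return sum(1 for x in range(N) if parent[x] == x) - 1
-- ===== Notes on version B (the rewrite author's own statement) =====
-- stated objective: alternative
-- what changed: A merges row/column components by rescanning and relabelling all n+m labels at every 'Y' cell; B maintains a union-find parent forest, chasing only two root chains per 'Y' cell, and counts roots at the end.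
import Mathlib
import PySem

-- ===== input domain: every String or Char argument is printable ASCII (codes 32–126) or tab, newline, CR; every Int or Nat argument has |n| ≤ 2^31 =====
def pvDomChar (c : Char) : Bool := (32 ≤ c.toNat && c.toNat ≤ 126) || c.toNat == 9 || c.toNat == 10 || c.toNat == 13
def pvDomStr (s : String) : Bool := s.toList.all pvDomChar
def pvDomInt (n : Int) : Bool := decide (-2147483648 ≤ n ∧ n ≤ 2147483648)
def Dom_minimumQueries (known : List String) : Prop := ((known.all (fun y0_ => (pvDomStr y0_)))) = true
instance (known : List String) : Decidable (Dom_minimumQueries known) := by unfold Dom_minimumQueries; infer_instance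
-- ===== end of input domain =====

-- B replaces A's full relabelling scan of all n+m labels at every 'Y' cell by a union-find
-- (root-chasing parent forest); equivalence of the return values is proved on Pre_ (inputs where A returns).

-- ===== PORT A =====

-- known[i][j] (string indexing; none = IndexError, excluded by Pre_)
def pvCharAt (known : List String) (i j : Nat) : Option Char :=
  PySem.Str.pyGet? (known.getD i "") (j : Int)

-- the two `for x in range(...)` relabel loops of A: every label equal to a becomes b
def pvRelabel (a b : Nat) (l : List Nat) : List Nat :=
  l.map (fun v => if v = a then b else v)

-- body of A's `for i,j in product(...)` loop
def pvStepA (known : List String) (st : List Nat × List Nat) (ij : Nat × Nat) :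
    List Nat × List Nat :=
  match pvCharAt known ij.1 ij.2 with
  | some c =>
      if c = 'Y' then
        let a := st.1.getD ij.1 0
        let b := st.2.getD ij.2 0
        (pvRelabel a b st.1, pvRelabel a b st.2)
      else st
  | none => st  -- unreachable under Pre_ (Python raises IndexError here)

def minimumQueries (known : List String) : Int :=
  let n := known.length
  let m := (known.headD "").length   -- len(known[0]); known ≠ [] by Pre_
  let rs := List.range n
  let cs := (List.range m).map (fun j => n + j)
  let cells := (List.range n).flatMap (fun i => (List.range m).map (fun j => (i, j)))
  let st := cells.foldl (pvStepA known) (rs, cs)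
  ((PySem.Set.ofList (st.1 ++ st.2)).length : Int) - 1

-- ===== PORT B =====

-- Source B's `find`: chase parents to the root; the while loop terminates within
-- parent.length steps on every state the program builds, so this fuel is exact there
def pvFind (parent : List Nat) (x : Nat) : Nat → Nat
  | 0 => x
  | f + 1 =>
      if parent.getD x 0 = x then x else pvFind parent (parent.getD x 0) f

-- body of Source B's inner loop for a 'Y' cell
def pvStepB (n : Nat) (parent : List Nat) (i j : Nat) : List Nat :=
  let ra := pvFind parent i parent.length
  let rb := pvFind parent (n + j) parent.length
  if ra ≠ rb then parent.set ra rb else parent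

def minimumQueries_alt (known : List String) : Int :=
  let n := known.length
  let m := (known.headD "").length   -- len(known[0]); known ≠ [] by Pre_
  let N := n + m
  let parent :=
    (List.range n).foldl (fun p i =>
      let row := known.getD i ""        -- row = known[i]
      (List.range m).foldl (fun p (j : Nat) =>
        match PySem.Str.pyGet? row (j : Int) with   -- row[j]; none unreachable under Pre_
        | some c => if c = 'Y' then pvStepB n p i j else p
        | none => p) p)
      (List.range N)
  (((List.range N).filter (fun x => parent.getD x 0 = x)).length : Int) - 1

-- ===== PRECONDITION & SPEC =====
-- Pre_ excludes exactly the inputs where Python A raises: the empty list (known[0] → IndexError)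
-- and lists with a row shorter than the first row (known[i][j] → IndexError).
def Pre_minimumQueries (known : List String) : Prop :=
  known ≠ [] ∧ ∀ s ∈ known, (known.headD "").length ≤ s.length
instance (known : List String) : Decidable (Pre_minimumQueries known) := by
  unfold Pre_minimumQueries; infer_instance

def pvWitness_minimumQueries : List String := ["YN", "NY"]

def Spec_minimumQueries (known : List String) (out : Int) : Prop := out = minimumQueries_alt known
instance (known : List String) (out : Int) : Decidable (Spec_minimumQueries known out) := by
  unfold Spec_minimumQueries; infer_instance

-- ===== CLAIM (what is proved, stated in full; the proofs are below) =====
def Claim_equal_minimumQueries : Prop := ∀ (known : List String), Dom_minimumQueries known → Pre_minimumQueries known → Spec_minimumQueries known (minimumQueries known)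

-- ===== LEMMAS AND PROOFS =====

-- B's inner-loop body as a function of a cell, used to fold B over the same cell list as A
def pvStepBC (known : List String) (n : Nat) (P : List Nat) (ij : Nat × Nat) : List Nat :=
  match pvCharAt known ij.1 ij.2 with
  | some c => if c = 'Y' then pvStepB n P ij.1 ij.2 else P
  | none => P

-- number of union-find roots among 0..N-1 (what B counts at the end)
def pvRC (N : Nat) (P : List Nat) : Nat :=
  ((List.range N).filter (fun x => P.getD x 0 = x)).length

-- A's label of node x (rows are 0..n-1, columns are n..n+m-1)
def pvLab (n : Nat) (rs cs : List Nat) (x : Nat) : Nat :=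
  if x < n then rs.getD x 0 else cs.getD (x - n) 0

-- Coupling invariant: A's label of every node is B's root of that node, roots are
-- reached within k parent steps, and k + (number of roots) ≤ n + m.
structure pvInv (n m : Nat) (rs cs P : List Nat) (k : Nat) : Prop where
  lrs : rs.length = n
  lcs : cs.length = m
  lP : P.length = n + m
  bound : ∀ y, y < n + m → P.getD y 0 < n + m
  krc : k + pvRC (n + m) P ≤ n + m
  fix : ∀ x, x < n + m → P.getD (pvFind P x k) 0 = pvFind P x k
  lab : ∀ x, x < n + m → pvLab n rs cs x = pvFind P x k

theorem pvFind_zero (P : List Nat) (x : Nat) : pvFind P x 0 = x := rfl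

theorem pvFind_succ (P : List Nat) (x f : Nat) :
    pvFind P x (f + 1) = if P.getD x 0 = x then x else pvFind P (P.getD x 0) f := rfl

theorem pvFind_fix_self (P : List Nat) (r : Nat) (h : P.getD r 0 = r) :
    ∀ f, pvFind P r f = r := by
  intro f; cases f with
  | zero => rfl
  | succ f => rw [pvFind_succ, if_pos h]

theorem pvFind_mono (P : List Nat) : ∀ (k f x : Nat), k ≤ f →
    P.getD (pvFind P x k) 0 = pvFind P x k → pvFind P x f = pvFind P x k := by
  intro k
  induction k with
  | zero =>
    intro f x _ h
    exact pvFind_fix_self P x h f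
  | succ k ih =>
    intro f x hkf h
    by_cases hx : P.getD x 0 = x
    · rw [pvFind_fix_self P x hx f, pvFind_fix_self P x hx (k + 1)]
    · obtain ⟨f', rfl⟩ : ∃ f', f = f' + 1 := ⟨f - 1, by omega⟩
      rw [pvFind_succ, if_neg hx] at h ⊢
      rw [pvFind_succ, if_neg hx]
      exact ih f' _ (by omega) h

theorem pvFind_lt (P : List Nat) (N : Nat) (hb : ∀ y, y < N → P.getD y 0 < N) :
    ∀ (f x : Nat), x < N → pvFind P x f < N := by
  intro f
  induction f with
  | zero => intro x hx; exact hx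
  | succ f ih =>
    intro x hx
    rw [pvFind_succ]
    by_cases h : P.getD x 0 = x
    · rwa [if_pos h]
    · rw [if_neg h]
      exact ih _ (hb x hx)

theorem pvGetD_set_self (l : List Nat) (a b : Nat) (h : a < l.length) :
    (l.set a b).getD a 0 = b := by
  simp [List.getD, h]

theorem pvGetD_set_ne (l : List Nat) (a b y : Nat) (h : y ≠ a) :
    (l.set a b).getD y 0 = l.getD y 0 := by
  rw [List.getD, List.getD, List.getElem?_set_ne (by omega)]

-- the key union step: after parent[a] := b, the root of x is b if it used to be a, else unchanged
theorem pvFind_set (P : List Nat) (a b : Nat) (ha : P.getD a 0 = a) (hb : P.getD b 0 = b)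
    (hab : a ≠ b) (haL : a < P.length) :
    ∀ (f x : Nat), P.getD (pvFind P x f) 0 = pvFind P x f →
      pvFind (P.set a b) x (f + 1) = if pvFind P x f = a then b else pvFind P x f := by
  intro f
  induction f with
  | zero =>
    intro x hx
    rw [pvFind_zero] at hx ⊢
    by_cases hxa : x = a
    · subst hxa
      have h1 : (P.set x b).getD x 0 = b := pvGetD_set_self P x b haL
      have h2 : (P.set x b).getD b 0 = b := by
        rw [pvGetD_set_ne P x b b (Ne.symm hab)]; exact hb
      rw [pvFind_succ, if_neg (by rw [h1]; exact Ne.symm hab), h1,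
        pvFind_fix_self _ _ h2, if_pos rfl]
    · have h1 : (P.set a b).getD x 0 = x := by rw [pvGetD_set_ne P a b x hxa]; exact hx
      rw [pvFind_succ, if_pos h1, if_neg hxa]
  | succ f ih =>
    intro x hx
    by_cases hPx : P.getD x 0 = x
    · rw [pvFind_fix_self P x hPx] at hx ⊢
      by_cases hxa : x = a
      · subst hxa
        have h1 : (P.set x b).getD x 0 = b := pvGetD_set_self P x b haL
        have h2 : (P.set x b).getD b 0 = b := by
          rw [pvGetD_set_ne P x b b (Ne.symm hab)]; exact hb
        rw [pvFind_succ, if_neg (by rw [h1]; exact Ne.symm hab), h1,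
          pvFind_fix_self _ _ h2, if_pos rfl]
      · have h1 : (P.set a b).getD x 0 = x := by rw [pvGetD_set_ne P a b x hxa]; exact hx
        rw [pvFind_fix_self _ _ h1, if_neg hxa]
    · have hxa : x ≠ a := fun h => hPx (by rw [h]; exact ha)
      have h1 : (P.set a b).getD x 0 = P.getD x 0 := pvGetD_set_ne P a b x hxa
      rw [pvFind_succ P x f, if_neg hPx] at hx ⊢
      rw [pvFind_succ (P.set a b) x (f + 1), if_neg (by rw [h1]; exact hPx), h1]
      exact ih _ hx

theorem pvCount_step (p q : Nat → Bool) :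
    ∀ (l : List Nat), l.Nodup → ∀ a ∈ l, p a = true → q a = false →
      (∀ x ∈ l, x ≠ a → p x = q x) → l.countP q + 1 = l.countP p := by
  intro l
  induction l with
  | nil => intro _ a ha; cases ha
  | cons h t ih =>
    intro hnd a ha hpa hqa hpq
    rcases List.mem_cons.mp ha with rfl | hat
    · rw [List.countP_cons_of_neg (by simp [hqa]),
          List.countP_cons_of_pos (by simpa using hpa)]
      have : t.countP q = t.countP p := by
        apply List.countP_congr
        intro x hx
        rw [hpq x (List.mem_cons_of_mem _ hx) (fun hxa => (List.nodup_cons.mp hnd).1 (hxa ▸ hx))]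
      omega
    · have hha : h ≠ a := fun hh => (List.nodup_cons.mp hnd).1 (hh ▸ hat)
      have hph := hpq h (List.mem_cons_self) hha
      have := ih (List.nodup_cons.mp hnd).2 a hat hpa hqa
        (fun x hx hxa => hpq x (List.mem_cons_of_mem _ hx) hxa)
      by_cases hh : p h = true
      · rw [List.countP_cons_of_pos (hph ▸ hh), List.countP_cons_of_pos hh]; omega
      · rw [List.countP_cons_of_neg (by simp [hph ▸ hh]), List.countP_cons_of_neg (by simp [hh])]
        omega

theorem pvRelabel_self (a : Nat) (l : List Nat) : pvRelabel a a l = l := by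
  unfold pvRelabel
  induction l with
  | nil => rfl
  | cons h t ih => rw [List.map_cons, ih]; split <;> simp_all

theorem pvRelabel_length (a b : Nat) (l : List Nat) : (pvRelabel a b l).length = l.length := by
  simp [pvRelabel]

theorem pvRelabel_getD (a b : Nat) (l : List Nat) (x : Nat) (h : x < l.length) :
    (pvRelabel a b l).getD x 0 = if l.getD x 0 = a then b else l.getD x 0 := by
  unfold pvRelabel
  rw [List.getD, List.getD, List.getElem?_map, List.getElem?_eq_getElem h]
  rfl

-- one cell preserves the coupling invariant
theorem pvStep_couple (known : List String) (n m : Nat) (rs cs P : List Nat) (k : Nat)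
    (inv : pvInv n m rs cs P k) (i j : Nat) (hi : i < n) (hj : j < m) :
    ∃ k', pvInv n m (pvStepA known (rs, cs) (i, j)).1 (pvStepA known (rs, cs) (i, j)).2
      (pvStepBC known n P (i, j)) k' := by
  unfold pvStepA pvStepBC
  cases hc : pvCharAt known i j with
  | none => exact ⟨k, inv⟩
  | some c =>
    by_cases hY : c = 'Y'
    · subst hY
      simp only [if_true]
      have hiN : i < n + m := by omega
      have hnjN : n + j < n + m := by omega
      have ha' : rs.getD i 0 = pvFind P i k := by
        have := inv.lab i hiN; simpa [pvLab, hi] using this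
      have hb' : cs.getD j 0 = pvFind P (n + j) k := by
        have := inv.lab (n + j) hnjN
        simpa [pvLab, show ¬ (n + j < n) by omega, Nat.add_sub_cancel_left] using this
      set a := rs.getD i 0 with hadef
      set b := cs.getD j 0 with hbdef
      have hafix : P.getD a 0 = a := by rw [ha']; exact inv.fix i hiN
      have hbfix : P.getD b 0 = b := by rw [hb']; exact inv.fix (n + j) hnjN
      have haN : a < n + m := by rw [ha']; exact pvFind_lt P (n + m) inv.bound k i hiN
      have hbN : b < n + m := by rw [hb']; exact pvFind_lt P (n + m) inv.bound k (n + j) hnjN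
      have hkN : k ≤ n + m := le_trans (Nat.le_add_right _ _) inv.krc
      have hra : pvFind P i P.length = a := by
        rw [inv.lP, pvFind_mono P k (n + m) i hkN (inv.fix i hiN)]; exact ha'.symm
      have hrb : pvFind P (n + j) P.length = b := by
        rw [inv.lP, pvFind_mono P k (n + m) (n + j) hkN (inv.fix (n + j) hnjN)]; exact hb'.symm
      by_cases hab : a = b
      · refine ⟨k, ?_⟩
        have hB : pvStepB n P i j = P := by
          unfold pvStepB; rw [hra, hrb, hab]; simp
        rw [hB, ← hab, pvRelabel_self, pvRelabel_self]
        exact inv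
      · have hB : pvStepB n P i j = P.set a b := by
          unfold pvStepB; rw [hra, hrb]; simp [hab]
        rw [hB]
        have haL : a < P.length := by rw [inv.lP]; exact haN
        have hset_a : (P.set a b).getD a 0 = b := pvGetD_set_self P a b haL
        have hkey := pvFind_set P a b hafix hbfix hab haL k
        have hrc : pvRC (n + m) (P.set a b) + 1 = pvRC (n + m) P := by
          unfold pvRC
          rw [← List.countP_eq_length_filter, ← List.countP_eq_length_filter]
          apply pvCount_step _ _ _ (List.nodup_range) a (List.mem_range.mpr haN)
            (by simp only [decide_eq_true_eq]; exact hafix)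
            (by simp only [decide_eq_false_iff_not]; rw [hset_a]; exact Ne.symm hab)
          intro x _ hxa
          rw [pvGetD_set_ne P a b x hxa]
        refine ⟨k + 1, ?_⟩
        constructor
        · rw [pvRelabel_length]; exact inv.lrs
        · rw [pvRelabel_length]; exact inv.lcs
        · rw [List.length_set]; exact inv.lP
        · intro y hy
          by_cases hya : y = a
          · subst hya; rw [hset_a]; exact hbN
          · rw [pvGetD_set_ne P a b y hya]; exact inv.bound y hy
        · have h1 := inv.krc; omega
        · intro x hx
          rw [hkey x (inv.fix x hx)]
          by_cases hr : pvFind P x k = a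
          · rw [if_pos hr, pvGetD_set_ne P a b b (Ne.symm hab)]; exact hbfix
          · rw [if_neg hr, pvGetD_set_ne P a b _ hr]; exact inv.fix x hx
        · intro x hx
          rw [hkey x (inv.fix x hx), ← inv.lab x hx]
          unfold pvLab
          by_cases hxn : x < n
          · simp only [if_pos hxn]
            exact pvRelabel_getD a b rs x (by rw [inv.lrs]; exact hxn)
          · simp only [if_neg hxn]
            exact pvRelabel_getD a b cs (x - n) (by rw [inv.lcs]; omega)
    · simp only [if_neg hY]
      exact ⟨k, inv⟩

theorem pvFold_couple (known : List String) (n m : Nat) :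
    ∀ (cells : List (Nat × Nat)) (rs cs P : List Nat) (k : Nat),
      (∀ c ∈ cells, c.1 < n ∧ c.2 < m) → pvInv n m rs cs P k →
      ∃ k', pvInv n m (cells.foldl (pvStepA known) (rs, cs)).1
        (cells.foldl (pvStepA known) (rs, cs)).2
        (cells.foldl (pvStepBC known n) P) k' := by
  intro cells
  induction cells with
  | nil => intro rs cs P k _ inv; exact ⟨k, inv⟩
  | cons c t ih =>
    intro rs cs P k hc inv
    obtain ⟨hc1, hc2⟩ := hc c List.mem_cons_self
    obtain ⟨k', inv'⟩ := pvStep_couple known n m rs cs P k inv c.1 c.2 hc1 hc2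
    simpa using ih (pvStepA known (rs, cs) c).1 (pvStepA known (rs, cs) c).2
      (pvStepBC known n P c) k' (fun d hd => hc d (List.mem_cons_of_mem _ hd)) inv'

theorem pvMem_iff (n m : Nat) (rs cs : List Nat) (h1 : rs.length = n) (h2 : cs.length = m)
    (y : Nat) : y ∈ rs ++ cs ↔ ∃ x, x < n + m ∧ pvLab n rs cs x = y := by
  constructor
  · intro hy
    rcases List.mem_append.mp hy with h | h
    · obtain ⟨x, hx, hxy⟩ := List.mem_iff_getElem.mp h
      refine ⟨x, by omega, ?_⟩
      unfold pvLab
      rw [if_pos (show x < n by omega), List.getD_eq_getElem rs 0 hx]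
      exact hxy
    · obtain ⟨x, hx, hxy⟩ := List.mem_iff_getElem.mp h
      refine ⟨n + x, by omega, ?_⟩
      unfold pvLab
      rw [if_neg (show ¬ (n + x < n) by omega), Nat.add_sub_cancel_left,
        List.getD_eq_getElem cs 0 hx]
      exact hxy
  · rintro ⟨x, hx, rfl⟩
    unfold pvLab
    by_cases hxn : x < n
    · rw [if_pos hxn]
      apply List.mem_append.mpr (Or.inl _)
      rw [List.getD_eq_getElem rs 0 (by omega)]
      exact rs.getElem_mem _
    · rw [if_neg hxn]
      apply List.mem_append.mpr (Or.inr _)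
      rw [List.getD_eq_getElem cs 0 (by omega)]
      exact cs.getElem_mem _

theorem pvFinal (n m : Nat) (rs cs P : List Nat) (k : Nat) (inv : pvInv n m rs cs P k) :
    (PySem.Set.ofList (rs ++ cs)).length = pvRC (n + m) P := by
  have hperm : (PySem.Set.ofList (rs ++ cs)).Perm
      ((List.range (n + m)).filter (fun x => P.getD x 0 = x)) := by
    apply (List.perm_ext_iff_of_nodup (PySem.Set.nodup_ofList _)
      ((List.nodup_range).filter _)).mpr
    intro y
    rw [PySem.Set.mem_ofList, List.mem_filter, List.mem_range,
      pvMem_iff n m rs cs inv.lrs inv.lcs y]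
    constructor
    · rintro ⟨x, hx, rfl⟩
      rw [inv.lab x hx]
      exact ⟨pvFind_lt P (n + m) inv.bound k x hx,
        by simp only [decide_eq_true_eq]; exact inv.fix x hx⟩
    · rintro ⟨hyN, hyfix⟩
      refine ⟨y, hyN, ?_⟩
      rw [inv.lab y hyN, pvFind_fix_self P y (by simpa using hyfix)]
  exact hperm.length_eq

theorem pvInit (n m : Nat) :
    pvInv n m (List.range n) ((List.range m).map (fun j => n + j)) (List.range (n + m)) 0 := by
  have hget : ∀ y, y < n + m → (List.range (n + m)).getD y 0 = y := by
    intro y hy; simp [List.getD, hy]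
  constructor
  · exact List.length_range
  · simp
  · exact List.length_range
  · intro y hy; rw [hget y hy]; exact hy
  · unfold pvRC
    rw [List.filter_eq_self.mpr, List.length_range]
    · omega
    · intro x hx
      simp only [decide_eq_true_eq]
      exact hget x (List.mem_range.mp hx)
  · intro x hx
    exact hget x hx
  · intro x hx
    show pvLab n _ _ x = x
    unfold pvLab
    by_cases hxn : x < n
    · simp [List.getD, hxn]
    · rw [if_neg hxn]
      have hxm : x - n < m := by omega
      rw [List.getD, List.getElem?_map, List.getElem?_range hxm]
      simp; omega

theorem pvMain (known : List String) : minimumQueries known = minimumQueries_alt known := by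
  simp only [minimumQueries, minimumQueries_alt]
  set n := known.length with hn
  set m := (known.headD "").length with hm
  have hBfold :
      (List.range n).foldl (fun p i =>
        let row := known.getD i ""
        (List.range m).foldl (fun p (j : Nat) =>
          match PySem.Str.pyGet? row (j : Int) with
          | some c => if c = 'Y' then pvStepB n p i j else p
          | none => p) p) (List.range (n + m))
      = ((List.range n).flatMap (fun i => (List.range m).map (fun j => (i, j)))).foldl
          (pvStepBC known n) (List.range (n + m)) := by
    rw [List.flatMap_def, List.foldl_flatten, List.foldl_map]
    congr 1
    funext p i
    rw [List.foldl_map]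
    rfl
  rw [hBfold]
  have hcells : ∀ c ∈ (List.range n).flatMap (fun i => (List.range m).map (fun j => (i, j))),
      c.1 < n ∧ c.2 < m := by
    intro c hc
    obtain ⟨i, hi, hc⟩ := List.mem_flatMap.mp hc
    obtain ⟨j, hj, rfl⟩ := List.mem_map.mp hc
    exact ⟨List.mem_range.mp hi, List.mem_range.mp hj⟩
  obtain ⟨k', inv'⟩ := pvFold_couple known n m
    ((List.range n).flatMap (fun i => (List.range m).map (fun j => (i, j))))
    (List.range n) ((List.range m).map (fun j => n + j)) (List.range (n + m)) 0
    hcells (pvInit n m)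
  rw [pvFinal n m _ _ _ k' inv']
  rfl

-- ===== VERDICT (by name: the statement is the Claim_ definition above) =====
theorem minimumQueries_spec : Claim_equal_minimumQueries := by
  intro known _ _
  unfold Spec_minimumQueries
  exact pvMain known
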